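-- pv_equiv track=rewrite | github.com/ramiaffes/CP-Solutions | CodeForces/PyPy 3-64/1145A | Thanos Sort/190713717.py | fonction
-- ===== SOURCE A (Python) =====
-- def fonction(L):
--     if len(L)==1:
--         return 1
--     elif sorted(L)==L:
--         return len(L)
--     else:
--        m=fonction(L[:(len(L)//2)])
--        d=fonction(L[(len(L)//2):])
--        return max(m,d)
-- ===== SOURCE B (Python) =====
-- def fonction(L):
--     best = 0
--     stack = [L]
--     while stack:
--         seg = stack.pop()
--         if sorted(seg) == seg:
--             if len(seg) > best:
--                 best = len(seg)
--         else:
--             h = len(seg) // 2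
--             stack.append(seg[:h])
--             stack.append(seg[h:])
--     return best
-- ===== Notes on version B (the rewrite author's own statement) =====
-- stated objective: alternative
-- what changed: Replaces A's recursion (max of two recursive calls on the halves) by an iterative worklist loop: an explicit stack of segments and a running best, updating best on sorted segments and pushing the two halves otherwise.
import Mathlib
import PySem

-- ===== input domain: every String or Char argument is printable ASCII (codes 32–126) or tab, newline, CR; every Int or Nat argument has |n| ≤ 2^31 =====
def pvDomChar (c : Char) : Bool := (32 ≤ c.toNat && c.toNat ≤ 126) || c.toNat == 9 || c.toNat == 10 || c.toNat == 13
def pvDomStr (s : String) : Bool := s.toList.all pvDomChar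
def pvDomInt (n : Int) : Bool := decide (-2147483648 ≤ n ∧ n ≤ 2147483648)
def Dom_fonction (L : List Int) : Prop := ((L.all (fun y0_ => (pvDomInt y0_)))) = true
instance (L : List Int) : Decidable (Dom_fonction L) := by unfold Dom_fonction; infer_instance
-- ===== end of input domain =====

-- B replaces A's recursion by an explicit-stack worklist loop with a running best; alternative decomposition, same cost.


-- termination helper cited by both ports' decreasing_by: an unsorted list has length ≥ 2
theorem pv_two_le (L : List Int) (hs : ¬ (PySem.List.sorted L (fun x => x)) = L) :
    2 ≤ L.length := by
  rcases L with _ | ⟨a, _ | ⟨b, t⟩⟩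
  · exact absurd (PySem.List.sorted_eq_self_of_pairwise [] (fun x => x) (by simp)) hs
  · exact absurd (PySem.List.sorted_eq_self_of_pairwise [a] (fun x => x) (by simp)) hs
  · simp

-- ===== PORT A =====
-- A: if len==1 → 1; elif sorted(L)==L → len(L); else max of the recursive results on the two halves.
def fonction (L : List Int) : Int :=
  if L.length = 1 then 1
  else if PySem.List.sorted L (fun x => x) = L then (L.length : Int)
  else
    let m := fonction (PySem.List.slice L none (some ((L.length / 2 : Nat) : Int)))
    let d := fonction (PySem.List.slice L (some ((L.length / 2 : Nat) : Int)) none)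
    max m d
termination_by L.length
decreasing_by
  · rename_i _h1 hs
    have h2 := pv_two_le L hs
    rw [PySem.List.slice_to_natCast]
    simp only [List.length_take]
    omega
  · rename_i _h1 hs
    have h2 := pv_two_le L hs
    rw [PySem.List.slice_from_natCast]
    simp only [List.length_drop]
    omega

-- ===== PORT B =====
-- B's loop: pop a segment; if sorted, bump best; else push the two halves.
def fonctionAltGo (best : Int) (stack : List (List Int)) : Int :=
  match stack with
  | [] => best
  | seg :: rest =>
    if PySem.List.sorted seg (fun x => x) = seg then
      fonctionAltGo (if (seg.length : Int) > best then (seg.length : Int) else best) rest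
    else
      fonctionAltGo best
        (seg.drop (seg.length / 2) :: seg.take (seg.length / 2) :: rest)
termination_by (stack.map (fun s => 3 ^ s.length)).sum
decreasing_by
  · have h1 : 1 ≤ 3 ^ seg.length := Nat.one_le_pow _ _ (by norm_num)
    simp only [List.map_cons, List.sum_cons]
    omega
  · rename_i hns
    have h2 := pv_two_le seg hns
    have ha : 3 ^ (seg.length - seg.length / 2) ≤ 3 ^ (seg.length - 1) :=
      Nat.pow_le_pow_right (by norm_num) (by omega)
    have hb : 3 ^ (seg.length / 2) ≤ 3 ^ (seg.length - 1) :=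
      Nat.pow_le_pow_right (by norm_num) (by omega)
    have hc : 2 * 3 ^ (seg.length - 1) < 3 ^ seg.length := by
      have h3 : 3 ^ seg.length = 3 * 3 ^ (seg.length - 1) := by
        rw [← pow_succ']
        congr 1
        omega
      have h4 : 1 ≤ 3 ^ (seg.length - 1) := Nat.one_le_pow _ _ (by norm_num)
      omega
    simp only [List.map_cons, List.sum_cons, List.length_drop, List.length_take]
    rw [Nat.min_eq_left (by omega)]
    omega

def fonction_alt (L : List Int) : Int := fonctionAltGo 0 [L]

-- ===== PRECONDITION & SPEC =====
def Spec_fonction (L : List Int) (out : Int) : Prop := out = fonction_alt L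
instance (L : List Int) (out : Int) : Decidable (Spec_fonction L out) := by unfold Spec_fonction; infer_instance

-- ===== CLAIM (what is proved, stated in full; the proofs are below) =====
def Claim_equal_fonction : Prop := ∀ (L : List Int), Dom_fonction L → Spec_fonction L (fonction L)

-- ===== LEMMAS AND PROOFS =====

-- A sorted list's value under A is its length (covers [] and singletons).
theorem fonction_of_sorted (L : List Int)
    (h : PySem.List.sorted L (fun x => x) = L) : fonction L = (L.length : Int) := by
  rw [fonction]
  by_cases h1 : L.length = 1
  · simp [h1]
  · simp [h1, h]

theorem fonction_nonneg (L : List Int) : 0 ≤ fonction L := by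
  induction L using fonction.induct with
  | case1 L h1 => rw [fonction]; simp [h1]
  | case2 L h1 h2 => rw [fonction]; simp [h1, h2]
  | case3 L h1 h2 ihm ihd =>
    rw [fonction]
    simp only [if_neg h1, if_neg h2]
    exact le_max_of_le_left ihm

-- The worklist loop computes the running max of A's value over the stacked segments.
theorem fonctionAltGo_spec (best : Int) (stack : List (List Int)) :
    fonctionAltGo best stack = stack.foldl (fun b s => max b (fonction s)) best := by
  induction best, stack using fonctionAltGo.induct with
  | case1 best => rw [fonctionAltGo]; rfl
  | case2 best seg rest hs ih =>
    rw [fonctionAltGo, if_pos hs]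
    simp only [dite_eq_ite] at ih
    rw [ih]
    simp only [List.foldl_cons, fonction_of_sorted seg hs]
    congr 1
    split_ifs with h <;> omega
  | case3 best seg rest hs ih =>
    rw [fonctionAltGo, if_neg hs, ih]
    simp only [List.foldl_cons]
    have hlen : seg.length ≠ 1 := by
      intro hc
      rcases seg with _ | ⟨a, _ | ⟨b, t⟩⟩
      · simp at hc
      · exact hs (PySem.List.sorted_eq_self_of_pairwise [a] (fun x => x) (by simp))
      · simp at hc
    have hA : fonction seg =
        max (fonction (seg.take (seg.length / 2))) (fonction (seg.drop (seg.length / 2))) := by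
      rw [fonction, if_neg hlen, if_neg hs, PySem.List.slice_to_natCast,
        PySem.List.slice_from_natCast]
    rw [hA]
    congr 1
    omega

-- ===== VERDICT (by name: the statement is the Claim_ definition above) =====
theorem fonction_spec : Claim_equal_fonction := by
  intro L _
  unfold Spec_fonction fonction_alt
  rw [fonctionAltGo_spec]
  simp [max_eq_right (fonction_nonneg L)]
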